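-- pv_equiv track=rewrite | github.com/BatuhanAktan/SchoolWork | CS121/Assignment 3/a3.py | get_enclosed_helper
-- ===== SOURCE A (Python) =====
-- def get_enclosed_helper(s):
--     '''
--     Returns the part of the string s that is
--     enclosed by the outermost pair of matching
--     parentheses. Helper to get_enclosed()
--
--     Parameters
--     ----------
--     s: str
--     string with the parantheses.
--
--     Returns
--     ------
--     str
-- 	enclosed segment.
--
--     Raises
--     ------
--     None
--     '''
--     if len(s)== 1:
--         return ''
--     else:
--         if s[-1] == ')': #looks for the ending bracket
--             return (s) #returns sliced segment
--         else:
--             return get_enclosed_helper(s[:-1])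
-- ===== SOURCE B (Python) =====
-- def get_enclosed_helper(s):
--     # Iterative scan from the end instead of A's tail recursion on s[:-1]:
--     # find the last ')' at an index >= 1 and return the prefix up to it.
--     for i in range(len(s) - 1, 0, -1):
--         if s[i] == ')':
--             return s[:i + 1]
--     return ''
-- ===== Notes on version B (the rewrite author's own statement) =====
-- stated objective: simpler
-- what changed: Replaces the tail recursion that repeatedly copies s[:-1] with a single iterative downward index scan that returns the prefix directly.
-- outside the precondition, e.g. on get_enclosed_helper(''): A raises IndexError, B returns ''
import Mathlib
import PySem

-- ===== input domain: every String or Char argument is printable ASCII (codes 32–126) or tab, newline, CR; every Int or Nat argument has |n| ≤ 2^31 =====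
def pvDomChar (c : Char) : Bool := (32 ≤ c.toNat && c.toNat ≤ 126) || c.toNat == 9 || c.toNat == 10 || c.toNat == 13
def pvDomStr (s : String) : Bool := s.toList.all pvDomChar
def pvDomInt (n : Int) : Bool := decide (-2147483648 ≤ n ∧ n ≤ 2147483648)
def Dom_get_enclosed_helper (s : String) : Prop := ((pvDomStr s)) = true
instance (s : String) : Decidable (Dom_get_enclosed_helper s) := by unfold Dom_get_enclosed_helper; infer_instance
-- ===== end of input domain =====

-- B replaces A's tail recursion on s[:-1] with a single downward index scan (simpler, one pass).


-- ===== PORT A =====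
-- A's recursion on the list of characters:
-- if len(s)==1 → ''; elif s[-1]==')' → s; else recurse on s[:-1] (= dropLast, exact).
def gehA : List Char → List Char
  | cs =>
    if cs.length = 1 then []
    else
      match h : cs.getLast? with     -- s[-1]; none = IndexError on '' (excluded by Pre_)
      | none => []
      | some c =>
        if c = ')' then cs
        else gehA cs.dropLast
termination_by cs => cs.length
decreasing_by
  have hne : cs ≠ [] := by intro hnil; rw [hnil] at h; simp at h
  simpa [List.length_dropLast] using Nat.sub_lt (List.length_pos_of_ne_nil hne) one_pos

def get_enclosed_helper (s : String) : String := String.ofList (gehA s.toList)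

-- ===== PORT B =====
-- B's loop body over the countdown range len(s)-1, …, 1; s[:i+1] = slice, exact.
def gehB (cs : List Char) : List Int → List Char
  | [] => []                         -- loop fell through: return ''
  | i :: rest =>
    match PySem.List.pyGet? cs i with
    | none => []                     -- unreachable: range indices are in bounds
    | some c =>
      if c = ')' then PySem.List.slice cs none (some (i + 1))
      else gehB cs rest

def get_enclosed_helper_alt (s : String) : String :=
  String.ofList (gehB s.toList (PySem.List.pyRange ((s.toList.length : Int) - 1) 0 (-1)))

-- ===== PRECONDITION & SPEC =====
-- Pre_ excludes only the empty string, on which A raises IndexError (s[-1]); B returns '' there.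
def Pre_get_enclosed_helper (s : String) : Prop := s ≠ ""
instance (s : String) : Decidable (Pre_get_enclosed_helper s) := by unfold Pre_get_enclosed_helper; infer_instance
def pvWitness_get_enclosed_helper : String := "(a)"

def Spec_get_enclosed_helper (s : String) (out : String) : Prop := out = get_enclosed_helper_alt s
instance (s : String) (out : String) : Decidable (Spec_get_enclosed_helper s out) := by unfold Spec_get_enclosed_helper; infer_instance

-- ===== CLAIM (what is proved, stated in full; the proofs are below) =====
def Claim_equal_get_enclosed_helper : Prop := ∀ (s : String), Dom_get_enclosed_helper s → Pre_get_enclosed_helper s → Spec_get_enclosed_helper s (get_enclosed_helper s)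

-- ===== LEMMAS AND PROOFS =====

lemma gehB_dropLast (cs : List Char) (l : List Int)
    (h : ∀ i ∈ l, 0 ≤ i ∧ i < (cs.length : Int) - 1) :
    gehB cs l = gehB cs.dropLast l := by
  induction l with
  | nil => rfl
  | cons i rest ih =>
    obtain ⟨h0, hlt⟩ := h i (List.mem_cons_self ..)
    have hrest := fun j hj => h j (List.mem_cons_of_mem _ hj)
    have hklt : i.toNat < cs.length - 1 := by omega
    have hget : PySem.List.pyGet? cs i = cs[i.toNat]? :=
      PySem.List.pyGet?_of_nonneg_of_lt cs h0 (by omega)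
    have hlen' : ((cs.dropLast.length : Int)) = (cs.length : Int) - 1 := by
      simp [List.length_dropLast]; omega
    have hget' : PySem.List.pyGet? cs.dropLast i = cs.dropLast[i.toNat]? :=
      PySem.List.pyGet?_of_nonneg_of_lt _ h0 (by omega)
    have hsame : cs.dropLast[i.toNat]? = cs[i.toNat]? := by
      rw [List.dropLast_eq_take]; exact List.getElem?_take_of_lt hklt
    simp only [gehB, hget, hget', hsame]
    cases hc : cs[i.toNat]? with
    | none => rfl
    | some c =>
      by_cases hcp : c = ')'
      · simp only [hcp, if_true]
        rw [PySem.List.slice_to cs (by omega), PySem.List.slice_to cs.dropLast (by omega),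
            List.dropLast_eq_take, List.take_take]
        congr 1
        omega
      · simp only [if_neg hcp]
        exact ih hrest

lemma main_lemma (cs : List Char) (hne : cs ≠ []) :
    gehA cs = gehB cs (PySem.List.pyRange ((cs.length : Int) - 1) 0 (-1)) := by
  induction hn : cs.length using Nat.strong_induction_on generalizing cs with
  | _ n ih =>
  subst hn
  have hpos : 0 < cs.length := List.length_pos_of_ne_nil hne
  by_cases h1 : cs.length = 1
  · rw [gehA, if_pos h1, h1, PySem.List.pyRange_neg_one_eq_nil (by omega)]
    rfl
  · rw [PySem.List.pyRange_neg_one_cons (by omega)]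
    rw [gehA, if_neg h1]
    split
    · -- getLast? = none: impossible, cs ≠ []
      rename_i heq
      exact absurd (List.getLast?_eq_none_iff.mp heq) hne
    · rename_i c heq
      have hidx : PySem.List.pyGet? cs ((cs.length : Int) - 1) = some c := by
        rw [PySem.List.pyGet?_of_nonneg_of_lt cs (by omega) (by omega)]
        have h' : ((cs.length : Int) - 1).toNat = cs.length - 1 := by omega
        rw [h', ← List.getLast?_eq_getElem?, heq]
      simp only [gehB, hidx]
      by_cases hcp : c = ')'
      · simp only [hcp, if_true]
        rw [PySem.List.slice_to cs (by omega)]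
        have h' : ((cs.length : Int) - 1 + 1).toNat = cs.length := by omega
        rw [h', List.take_length]
      · simp only [if_neg hcp]
        have hdl : cs.dropLast.length = cs.length - 1 := List.length_dropLast (xs := cs)
        have hdne : cs.dropLast ≠ [] := by
          intro hnil
          rw [hnil] at hdl
          simp at hdl
          omega
        have hrec := ih (cs.length - 1) (by omega) cs.dropLast hdne hdl
        rw [gehB_dropLast cs (PySem.List.pyRange ((cs.length : Int) - 1 - 1) 0 (-1))
              (fun j hj => by
                rw [PySem.List.mem_pyRange_neg_one] at hj
                omega)]
        rw [hrec]
        congr 2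
        omega

-- ===== VERDICT (by name: the statement is the Claim_ definition above) =====
theorem get_enclosed_helper_spec : Claim_equal_get_enclosed_helper := by
  intro s _ hpre
  unfold Spec_get_enclosed_helper get_enclosed_helper get_enclosed_helper_alt
  have hne : s.toList ≠ [] := fun h => hpre (String.toList_eq_nil_iff.mp h)
  rw [main_lemma s.toList hne]
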